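-- pv_equiv track=rewrite | github.com/XdibsAI/DIBS-UMKM | frontend/fix_tabbar_position.py | find_build_method_range
-- ===== SOURCE A (Python) =====
-- def find_build_method_range(lines):
--     """Cari baris awal dan akhir dari method build()"""
--     start = None
--     brace_count = 0
--
--     for i, line in enumerate(lines):
--         if start is None:
--             if '@override' in line and any('Widget build' in l for l in lines[i:i+3]):
--                 start = i
--                 continue
--
--         if start is not None and i >= start:
--             brace_count += line.count('{') - line.count('}')
--             if i > start and brace_count == 0:
--                 return start, i
--
--     return start, None
-- ===== SOURCE B (Python) =====
-- def find_build_method_range(lines):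
--     """Cari baris awal dan akhir dari method build()"""
--     n = len(lines)
--     # Phase 1: first index whose line has '@override' with 'Widget build' within 3 lines.
--     start = next((i for i in range(n)
--                   if '@override' in lines[i]
--                   and any('Widget build' in l for l in lines[i:i+3])), None)
--     if start is None:
--         return None, None
--     # Phase 2 via prefix sums: pref[k] = net brace balance of lines[:k].
--     pref = [0]
--     for line in lines:
--         pref.append(pref[-1] + line.count('{') - line.count('}'))
--     # The method ends at the first j > start where the balance accumulated from
--     # line start+1 returns to zero, i.e. pref[j+1] == pref[start+1].
--     end = next((j for j in range(start + 1, n) if pref[j + 1] == pref[start + 1]), None)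
--     return start, end
-- ===== Notes on version B (the rewrite author's own statement) =====
-- stated objective: alternative
-- what changed: Instead of one interleaved loop carrying a running brace counter, B first finds the start line, then precomputes a global prefix-sum array of brace deltas and finds the end line as the first later index whose prefix value equals the one at start+1 (no running counter during the search).
import Mathlib
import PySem

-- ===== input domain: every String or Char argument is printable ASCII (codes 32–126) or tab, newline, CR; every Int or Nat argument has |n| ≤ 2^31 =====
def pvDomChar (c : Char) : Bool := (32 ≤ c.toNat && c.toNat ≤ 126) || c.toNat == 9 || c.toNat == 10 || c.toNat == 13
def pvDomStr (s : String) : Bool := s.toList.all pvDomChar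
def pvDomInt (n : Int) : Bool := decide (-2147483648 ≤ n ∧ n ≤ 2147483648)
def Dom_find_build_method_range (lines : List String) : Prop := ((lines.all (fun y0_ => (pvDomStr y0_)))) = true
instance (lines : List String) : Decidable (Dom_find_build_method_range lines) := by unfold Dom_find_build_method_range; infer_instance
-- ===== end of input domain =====

-- B replaces A's interleaved loop with a phase-1 start search plus a precomputed
-- prefix-sum array of brace deltas whose first repeated value locates the end
-- line (objective: alternative formulation, not faster).

-- ===== PORT A =====
-- shared by both ports: "'@override' in line and any('Widget build' in l for l in lines[i:i+3])"
def pvStartCond (all : List String) (i : Nat) (line : String) : Bool :=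
  PySem.Str.isIn "@override" line &&
    (PySem.List.slice all (some (i : Int)) (some ((i : Int) + 3))).any
      (fun l => PySem.Str.isIn "Widget build" l)

-- shared by both ports: "line.count('{') - line.count('}')"
def pvBraceDelta (line : String) : Int :=
  (PySem.Str.count line "{" : Int) - (PySem.Str.count line "}" : Int)

-- A's single for-loop over enumerate(lines) with state (start, brace_count)
def findLoopA (all : List String) : List String → Nat → Option Nat → Int → Option Int × Option Int
  | [], _, start, _ => (start.map (fun s => (s : Int)), none)
  | line :: rest, i, none, bc =>
      if pvStartCond all i line then
        findLoopA all rest (i + 1) (some i) bc            -- start = i; continue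
      else
        findLoopA all rest (i + 1) none bc
  | line :: rest, i, some s, bc =>
      let bc' := bc + pvBraceDelta line
      if decide (s < i) && decide (bc' = 0) then ((some (s : Int)), some (i : Int))
      else findLoopA all rest (i + 1) (some s) bc'

def find_build_method_range (lines : List String) : Option Int × Option Int :=
  findLoopA lines lines 0 none 0

-- ===== PORT B =====
-- phase 1: next((i for i in range(n) if cond), None); ported as recursion over the
-- enumerated lines (same first-match semantics)
def pvPhase1 (all : List String) : List String → Nat → Option Nat
  | [], _ => none
  | line :: rest, i => if pvStartCond all i line then some i else pvPhase1 all rest (i + 1)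

-- "pref = [0]; for line in lines: pref.append(pref[-1] + delta)" — the prefix array
def buildPref : List String → Int → List Int
  | [], last => [last]
  | line :: rest, last => last :: buildPref rest (last + pvBraceDelta line)

def find_build_method_range_alt (lines : List String) : Option Int × Option Int :=
  match pvPhase1 lines lines 0 with
  | none => (none, none)
  | some s =>
      let pref := buildPref lines 0
      let target := pref.getD (s + 1) 0   -- indices ≤ len(lines) are always in range for pref
      (some (s : Int),
        ((List.range' (s + 1) (lines.length - (s + 1))).find?
            (fun j => pref.getD (j + 1) 0 == target)).map (fun j => (j : Int)))

-- ===== PRECONDITION & SPEC =====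
def Spec_find_build_method_range (lines : List String) (out : Option Int × Option Int) : Prop := out = find_build_method_range_alt lines
instance (lines : List String) (out : Option Int × Option Int) : Decidable (Spec_find_build_method_range lines out) := by unfold Spec_find_build_method_range; infer_instance

-- ===== CLAIM =====
def Claim_equal_find_build_method_range : Prop := ∀ (lines : List String), Dom_find_build_method_range lines → Spec_find_build_method_range lines (find_build_method_range lines)

-- ===== LEMMAS AND PROOFS =====

-- proof-side reformulation of A's loop after start is found
def pvPhase2 : List String → Nat → Int → Option Int
  | [], _, _ => none
  | line :: rest, i, bc =>
      let bc' := bc + pvBraceDelta line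
      if bc' = 0 then some (i : Int) else pvPhase2 rest (i + 1) bc'

theorem findLoopA_some (all : List String) :
    ∀ (rest : List String) (i : Nat) (s : Nat) (bc : Int), s < i →
      findLoopA all rest i (some s) bc = (some (s : Int), pvPhase2 rest i bc) := by
  intro rest
  induction rest with
  | nil => intro i s bc _; simp [findLoopA, pvPhase2]
  | cons line rest ih =>
      intro i s bc hsi
      simp only [findLoopA, pvPhase2, hsi, decide_true, Bool.true_and]
      by_cases h0 : bc + pvBraceDelta line = 0
      · simp [h0]
      · simp [h0, ih (i + 1) s _ (Nat.lt_succ_of_lt hsi)]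

theorem findLoopA_none (all : List String) :
    ∀ (rest : List String) (i : Nat), rest = all.drop i →
      findLoopA all rest i none 0 =
        match pvPhase1 all rest i with
        | none => (none, none)
        | some s => (some (s : Int), pvPhase2 (all.drop (s + 1)) (s + 1) 0) := by
  intro rest
  induction rest with
  | nil => intro i _; simp [findLoopA, pvPhase1]
  | cons line rest ih =>
      intro i hdrop
      have htail : all.drop (i + 1) = rest := by
        have : (List.drop i all).tail = List.drop (i + 1) all := List.tail_drop
        rw [← hdrop] at this
        simpa using this.symm
      by_cases hc : pvStartCond all i line
      · simp only [findLoopA, pvPhase1, hc, if_true]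
        rw [findLoopA_some all rest (i + 1) i 0 (Nat.lt_succ_self i), htail]
      · simp only [findLoopA, pvPhase1, hc]
        exact ih (i + 1) htail.symm

-- find? congruence on the scanned list
theorem find?_congr_mem {α : Type} (l : List α) (p q : α → Bool)
    (h : ∀ x ∈ l, p x = q x) : l.find? p = l.find? q := by
  induction l with
  | nil => rfl
  | cons a l ih =>
      simp only [List.find?]
      rw [h a (List.mem_cons_self ..)]
      cases q a
      · exact ih (fun x hx => h x (List.mem_cons_of_mem _ hx))
      · rfl

theorem buildPref_length : ∀ (l : List String) (c : Int), (buildPref l c).length = l.length + 1 := by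
  intro l; induction l with
  | nil => intro c; rfl
  | cons a l ih => intro c; simp [buildPref, ih]

theorem buildPref_head (l : List String) (c : Int) : (buildPref l c)[0]?.getD 0 = c := by
  cases l <;> rfl

theorem buildPref_shift : ∀ (l : List String) (c d : Int),
    buildPref l (c + d) = (buildPref l c).map (· + d) := by
  intro l; induction l with
  | nil => intro c d; rfl
  | cons a l ih =>
      intro c d
      simp only [buildPref, List.map_cons]
      congr 1
      rw [show c + d + pvBraceDelta a = (c + pvBraceDelta a) + d by ring]
      exact ih (c + pvBraceDelta a) d

theorem buildPref_drop : ∀ (l : List String) (m : Nat) (c : Int), m ≤ l.length →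
    (buildPref l c).drop m = buildPref (l.drop m) ((buildPref l c).getD m 0) := by
  intro l
  induction l with
  | nil =>
      intro m c hm
      have hm0 : m = 0 := by simpa using hm
      subst hm0
      simp [buildPref]
  | cons a l ih =>
      intro m c hm
      cases m with
      | zero => simp [List.getD, buildPref_head]
      | succ m' =>
          simp only [buildPref, List.drop_succ_cons, List.getD, List.getElem?_cons_succ]
          exact ih m' _ (by simpa using hm)

-- pvPhase2 as a find? over the index range, against the prefix array started at bc
theorem pvPhase2_find? : ∀ (rest : List String) (i : Nat) (bc : Int),
    pvPhase2 rest i bc =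
      ((List.range' i rest.length).find?
          (fun j => (buildPref rest bc).getD (j + 1 - i) 0 == 0)).map (fun j => (j : Int)) := by
  intro rest
  induction rest with
  | nil => intro i bc; rfl
  | cons line rest ih =>
      intro i bc
      have hhead : ((buildPref (line :: rest) bc).getD (i + 1 - i) 0 == 0)
          = decide (bc + pvBraceDelta line = 0) := by
        rw [show i + 1 - i = 1 by omega]
        simp only [buildPref, List.getD, List.getElem?_cons_succ]
        rw [buildPref_head]
        by_cases h : bc + pvBraceDelta line = 0 <;> simp [h]
      simp only [List.length_cons, List.range'_succ]
      by_cases h0 : bc + pvBraceDelta line = 0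
      · rw [List.find?_cons_of_pos (by rw [hhead]; simp [h0])]
        simp [pvPhase2, h0]
      · rw [List.find?_cons_of_neg (by rw [hhead]; simp [h0])]
        have hq : (List.range' (i + 1) rest.length).find?
              (fun j => (buildPref rest (bc + pvBraceDelta line)).getD (j + 1 - (i + 1)) 0 == 0)
            = (List.range' (i + 1) rest.length).find?
              (fun j => (buildPref (line :: rest) bc).getD (j + 1 - i) 0 == 0) := by
          apply find?_congr_mem
          intro j hj
          have hji : i + 1 ≤ j := (List.mem_range'_1.mp hj).1
          rw [show j + 1 - i = (j + 1 - (i + 1)) + 1 by omega]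
          simp [buildPref, List.getD]
        simp only [pvPhase2, if_neg h0]
        rw [ih (i + 1) (bc + pvBraceDelta line), hq]

-- pvPhase1 returns an in-range index
theorem pvPhase1_lt (all : List String) :
    ∀ (rest : List String) (i s : Nat), pvPhase1 all rest i = some s →
      i ≤ s ∧ s < i + rest.length := by
  intro rest
  induction rest with
  | nil => intro i s h; simp [pvPhase1] at h
  | cons line rest ih =>
      intro i s h
      simp only [pvPhase1] at h
      by_cases hc : pvStartCond all i line
      · rw [if_pos hc] at h
        cases h
        simp
      · rw [if_neg hc] at h
        have := ih (i + 1) s h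
        constructor
        · omega
        · simp only [List.length_cons]; omega

-- the two end-search conditions agree on the scanned range
theorem phase2_eq_prefSearch (lines : List String) (s : Nat) (hs : s < lines.length) :
    pvPhase2 (lines.drop (s + 1)) (s + 1) 0 =
      ((List.range' (s + 1) (lines.length - (s + 1))).find?
          (fun j => (buildPref lines 0).getD (j + 1) 0 == (buildPref lines 0).getD (s + 1) 0)).map
        (fun j => (j : Int)) := by
  rw [pvPhase2_find?]
  have hlen : (lines.drop (s + 1)).length = lines.length - (s + 1) := by simp
  rw [hlen]
  have hcong : (List.range' (s + 1) (lines.length - (s + 1))).find?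
        (fun j => (buildPref (lines.drop (s + 1)) 0).getD (j + 1 - (s + 1)) 0 == 0)
      = (List.range' (s + 1) (lines.length - (s + 1))).find?
        (fun j => (buildPref lines 0).getD (j + 1) 0 == (buildPref lines 0).getD (s + 1) 0) := by
    apply find?_congr_mem
    intro j hj
    have hjmem := List.mem_range'_1.mp hj
    set P := buildPref lines 0 with hP
    have hm : s + 1 ≤ lines.length := hs
    have hdrop := buildPref_drop lines (s + 1) 0 hm
    have hshift : buildPref (lines.drop (s + 1)) 0
        = (buildPref (lines.drop (s + 1)) (P.getD (s + 1) 0)).map (· + (-(P.getD (s + 1) 0))) := by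
      have h1 := buildPref_shift (lines.drop (s + 1)) (P.getD (s + 1) 0) (-(P.getD (s + 1) 0))
      simpa using h1
    rw [hshift, ← hdrop]
    have hj1 : s + 1 ≤ j := hjmem.1
    have hj2 : j < lines.length := by
      have := hjmem.2
      omega
    have hPlen : P.length = lines.length + 1 := buildPref_length lines 0
    have hget : (P.drop (s + 1))[j - s]? = P[j + 1]? := by
      rw [List.getElem?_drop]
      congr 1
      omega
    have hsome : P[j + 1]? = some (P.getD (j + 1) 0) := by
      have hlt : j + 1 < P.length := by omega
      rw [List.getD_eq_getElem?_getD, List.getElem?_eq_getElem hlt]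
      rfl
    rw [show j + 1 - (s + 1) = j - s by omega]
    have hval : ((P.drop (s + 1)).map (· + (-(P.getD (s + 1) 0)))).getD (j - s) 0
        = P.getD (j + 1) 0 - P.getD (s + 1) 0 := by
      rw [List.getD_eq_getElem?_getD, List.getElem?_map, hget, hsome]
      simp only [Option.map_some, Option.getD_some]
      ring
    rw [hval]
    simp [sub_eq_zero]
  rw [hcong]

-- ===== VERDICT =====
theorem find_build_method_range_spec : Claim_equal_find_build_method_range := by
  intro lines _
  unfold Spec_find_build_method_range find_build_method_range find_build_method_range_alt
  rw [findLoopA_none lines lines 0 (by simp)]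
  cases hp : pvPhase1 lines lines 0 with
  | none => simp
  | some s =>
      have hs : s < lines.length := by
        have := pvPhase1_lt lines lines 0 s hp
        omega
      dsimp only
      rw [phase2_eq_prefSearch lines s hs]
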